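-- pv_equiv track=rewrite | github.com/mateoMG/PCSS_punctuation | data.py | tagging
-- ===== SOURCE A (Python) =====
-- def tagging(x, p_numbers):
--     """""
--     Tag every word in the sentence
--     """""
--     data = []
--     tag = []
--     for i in range(len(x)-1):
--         var_1 = False
--         for k in range(len(p_numbers)):
--             if x[i+1] == p_numbers[k]:
--                 tag.append(k+1)
--                 var_1 = True
--                 break
--         if not var_1:
--             tag.append(0)
--         data.append(x[i])
--     data.append(x[len(x)-1])
--     tag.append(0)
--     delete_punc(data, tag, p_numbers)
--     return data, tag
--
-- def delete_punc(data, tag, p_numbers):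
--     """""
--     Delete punctuation's ids and tags
--     """""
--     index = []
--     for i in range(len(data)):
--         for k in range(len(p_numbers)):
--             if data[i] == p_numbers[k]:
--                 index.append(i)
--                 break
--     for i in range(len(index)):
--         data.pop(index[i]-i)
--         tag.pop(index[i]-i)
-- ===== SOURCE B (Python) =====
-- def tagging(x, p_numbers):
--     """Tag each word by the 1-based index of the following token in p_numbers
--     (0 if none / last word), then drop the punctuation tokens themselves.
--     One pass using a first-occurrence index dict instead of nested scans."""
--     first = {}
--     for k, t in enumerate(p_numbers):
--         if t not in first:
--             first[t] = k + 1
--     data = []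
--     tag = []
--     n = len(x)
--     for i, w in enumerate(x):
--         if w in first:
--             continue
--         data.append(w)
--         tag.append(first.get(x[i + 1], 0) if i < n - 1 else 0)
--     return data, tag
-- ===== Notes on version B (the rewrite author's own statement) =====
-- stated objective: faster
-- what changed: B replaces A's nested scans of p_numbers (one per word for tagging and one per word for deletion) and its collect-indices-then-pop deletion with a first-occurrence index dict built once over p_numbers and a single filtering pass over x.
import Mathlib
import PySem

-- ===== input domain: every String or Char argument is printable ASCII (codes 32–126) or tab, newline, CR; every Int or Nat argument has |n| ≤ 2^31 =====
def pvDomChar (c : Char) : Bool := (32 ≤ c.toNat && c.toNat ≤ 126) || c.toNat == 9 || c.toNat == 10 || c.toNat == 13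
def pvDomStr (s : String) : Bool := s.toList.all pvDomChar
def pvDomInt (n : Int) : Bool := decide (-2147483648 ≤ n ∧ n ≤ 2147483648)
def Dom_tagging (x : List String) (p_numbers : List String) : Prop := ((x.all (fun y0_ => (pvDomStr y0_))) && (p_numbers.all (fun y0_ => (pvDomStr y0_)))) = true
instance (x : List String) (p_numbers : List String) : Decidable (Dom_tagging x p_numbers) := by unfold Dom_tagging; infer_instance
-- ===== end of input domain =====

-- B builds a first-occurrence index dict over p_numbers once and filters x in one pass
-- (faster: O(n+m) instead of A's O(n*m) nested scans). A mutates only its local lists;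
-- equivalence is about the returned pair.

-- ===== PORT A =====
-- inner loop of A's tagging: first k with x[i+1] == p_numbers[k], returning k+1 (break)
def pvAScan (w : String) : List String → Int → Option Int
  | [], _ => none
  | q :: rest, k => if w == q then some (k + 1) else pvAScan w rest (k + 1)

-- inner loop of delete_punc: scan with break = membership test
def pvAMem (w : String) : List String → Bool
  | [] => false
  | q :: rest => if w == q then true else pvAMem w rest

-- first loop of A's tagging: i walks the adjacent pairs x[i], x[i+1]
def pvAPhase1 (p : List String) : List String → List String × List Int
  | [] => ([], [])
  | [_] => ([], [])
  | w :: y :: rest =>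
      let t : Int := match pvAScan y p 0 with | some v => v | none => 0
      let r := pvAPhase1 p (y :: rest)
      (w :: r.1, t :: r.2)

-- first loop of delete_punc: collect absolute indices of punctuation tokens (i = current index)
def pvCollect (p : List String) : List String → Int → List Int
  | [], _ => []
  | w :: rest, i =>
      if pvAMem w p then i :: pvCollect p rest (i + 1) else pvCollect p rest (i + 1)

-- second loop of delete_punc: data.pop(index[i]-i); tag.pop(index[i]-i)
def pvPops : List String → List Int → List Int → Int → List String × List Int
  | d, t, [], _ => (d, t)
  | d, t, j :: rest, i =>
      match PySem.List.pop? d (j - i), PySem.List.pop? t (j - i) with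
      | some (_, d'), some (_, t') => pvPops d' t' rest (i + 1)
      | _, _ => (d, t)   -- unreachable: the collected indices are always valid

def pvDeletePunc (data : List String) (tag : List Int) (p : List String) :
    List String × List Int :=
  pvPops data tag (pvCollect p data 0) 0

def tagging (x : List String) (p_numbers : List String) : List String × List Int :=
  let r := pvAPhase1 p_numbers x
  match PySem.List.pyGet? x ((x.length : Int) - 1) with
  | none => ([], [])   -- x = []: the Python raises IndexError here (excluded by Pre_tagging)
  | some last => pvDeletePunc (r.1 ++ [last]) (r.2 ++ [0]) p_numbers

-- ===== PORT B =====
-- for k, t in enumerate(p_numbers): if t not in first: first[t] = k+1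
def pvBFirst : List String → PySem.Dict String Int → Int → PySem.Dict String Int
  | [], d, _ => d
  | t :: rest, d, k => pvBFirst rest (if d.contains t then d else d.insert t (k + 1)) (k + 1)

-- for i, w in enumerate(x): skip punctuation, else append w and first.get(x[i+1], 0)
-- (i < n-1 iff the tail is nonempty, and x[i+1] is its head)
def pvBGo (first : PySem.Dict String Int) : List String → List String × List Int
  | [] => ([], [])
  | w :: rest =>
      if first.contains w then pvBGo first rest
      else
        let tg : Int := match rest with | [] => 0 | y :: _ => first.getD y 0
        let r := pvBGo first rest
        (w :: r.1, tg :: r.2)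

def tagging_alt (x : List String) (p_numbers : List String) : List String × List Int :=
  pvBGo (pvBFirst p_numbers PySem.Dict.empty 0) x

-- ===== PRECONDITION & SPEC =====
-- Pre_ excludes only x = [], where the Python A raises IndexError on x[len(x)-1].
def Pre_tagging (x : List String) (p_numbers : List String) : Prop := x ≠ []
instance (x : List String) (p_numbers : List String) : Decidable (Pre_tagging x p_numbers) := by
  unfold Pre_tagging; infer_instance

def pvWitness_tagging : List String × List String := (["hi", ",", "bye"], [",", "."])

def Spec_tagging (x : List String) (p_numbers : List String) (out : List String × List Int) : Prop :=
  out = tagging_alt x p_numbers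
instance (x : List String) (p_numbers : List String) (out : List String × List Int) :
    Decidable (Spec_tagging x p_numbers out) := by unfold Spec_tagging; infer_instance

-- ===== CLAIM (what is proved, stated in full; the proofs are below) =====
def Claim_equal_tagging : Prop := ∀ (x : List String) (p_numbers : List String),
  Dom_tagging x p_numbers → Pre_tagging x p_numbers → Spec_tagging x p_numbers (tagging x p_numbers)

-- ===== LEMMAS AND PROOFS =====

-- the tag value both programs attach to a word whose successor is y
def pvFtag (p : List String) (y : String) : Int :=
  match pvAScan y p 0 with | some v => v | none => 0

-- the tag list A's phase 1 produces for x (after the trailing 0 is appended)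
def pvTagsOf (p : List String) : List String → List Int
  | [] => []
  | [_] => [0]
  | _ :: y :: rest => pvFtag p y :: pvTagsOf p (y :: rest)

-- the common filtered result: drop the pairs whose word is punctuation
def pvKeep (p : List String) : List String → List Int → List String × List Int
  | [], _ => ([], [])
  | _ :: _, [] => ([], [])
  | w :: d, b :: t =>
      if pvAMem w p then pvKeep p d t
      else
        let r := pvKeep p d t
        (w :: r.1, b :: r.2)

theorem pvAPhase1_eq (p : List String) :
    ∀ (x : List String) (h : x ≠ []),
      (pvAPhase1 p x).1 ++ [x.getLast h] = x ∧ (pvAPhase1 p x).2 ++ [0] = pvTagsOf p x := by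
  intro x
  induction x with
  | nil => intro h; exact absurd rfl h
  | cons w rest ih =>
    intro _
    cases rest with
    | nil => simp [pvAPhase1, pvTagsOf]
    | cons y r =>
      obtain ⟨h1, h2⟩ := ih (by simp)
      refine ⟨?_, ?_⟩
      · simpa [pvAPhase1, List.getLast_cons] using h1
      · simpa [pvAPhase1, pvTagsOf, pvFtag] using h2

theorem pvAScan_isSome (w : String) :
    ∀ (p : List String) (k : Int), (pvAScan w p k).isSome = pvAMem w p := by
  intro p
  induction p with
  | nil => intro k; rfl
  | cons q rest ih =>
    intro k
    by_cases h : w == q <;> simp [pvAScan, pvAMem, h, ih]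

theorem pvBFirst_get? (y : String) :
    ∀ (p : List String) (d : PySem.Dict String Int) (k : Int),
      (pvBFirst p d k).get? y = (d.get? y).or (pvAScan y p k) := by
  intro p
  induction p with
  | nil => intro d k; simp [pvBFirst, pvAScan]
  | cons q rest ih =>
    intro d k
    rw [pvBFirst, ih]
    by_cases hq : y = q
    · subst hq
      by_cases hc : d.contains y
      · cases hg : d.get? y with
        | none =>
          exfalso
          rw [PySem.Dict.contains_eq_isSome_get?, hg] at hc
          exact Bool.noConfusion hc
        | some v => simp [pvAScan, hc, hg]
      · have hnone : d.get? y = none := by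
          cases hg : d.get? y with
          | none => rfl
          | some v =>
            exfalso; apply hc
            rw [PySem.Dict.contains_eq_isSome_get?, hg]; rfl
        simp [pvAScan, hc, hnone, PySem.Dict.get?_insert_self]
    · by_cases hc : d.contains q
      · simp [pvAScan, hq, hc]
      · simp [pvAScan, hq, hc, PySem.Dict.get?_insert_of_ne _ _ hq]

theorem pvBFirst_getD (p : List String) (y : String) :
    (pvBFirst p PySem.Dict.empty 0).getD y 0 = pvFtag p y := by
  rw [PySem.Dict.getD_eq_get?_getD, pvBFirst_get?, PySem.Dict.get?_empty]
  unfold pvFtag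
  cases pvAScan y p 0 <;> rfl

theorem pvBFirst_contains (p : List String) (y : String) :
    (pvBFirst p PySem.Dict.empty 0).contains y = pvAMem y p := by
  rw [PySem.Dict.contains_eq_isSome_get?, pvBFirst_get?, PySem.Dict.get?_empty]
  simpa using pvAScan_isSome y p 0

theorem pvBGo_eq (p : List String) :
    ∀ (x : List String), pvBGo (pvBFirst p PySem.Dict.empty 0) x = pvKeep p x (pvTagsOf p x) := by
  intro x
  induction x with
  | nil => rfl
  | cons w rest ih =>
    cases rest with
    | nil =>
      rw [pvBGo, pvBFirst_contains]
      by_cases h : pvAMem w p <;> simp [h, pvTagsOf, pvKeep, pvBGo]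
    | cons y r =>
      rw [pvBGo, pvBFirst_contains, ih]
      by_cases h : pvAMem w p <;>
        simp [h, pvTagsOf, pvKeep, pvBFirst_getD]

-- helper: erasing at the length of the prefix removes the head of the suffix
theorem pvEraseIdx_append (kd d : List String) (w : String) :
    (kd ++ w :: d).eraseIdx kd.length = kd ++ d := by
  induction kd with
  | nil => rfl
  | cons a ka ih => simpa [List.eraseIdx] using ih

theorem pvEraseIdx_append_int (kt t : List Int) (b : Int) :
    (kt ++ b :: t).eraseIdx kt.length = kt ++ t := by
  induction kt with
  | nil => rfl
  | cons a ka ih => simpa [List.eraseIdx] using ih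

theorem pvPops_eq (p : List String) :
    ∀ (d : List String) (t : List Int) (kd : List String) (kt : List Int) (i : Int),
      d.length = t.length → kd.length = kt.length →
      pvPops (kd ++ d) (kt ++ t) (pvCollect p d (i + kd.length)) i
        = (kd ++ (pvKeep p d t).1, kt ++ (pvKeep p d t).2) := by
  intro d
  induction d with
  | nil =>
    intro t kd kt i hlen _
    cases t with
    | nil => simp [pvCollect, pvPops, pvKeep]
    | cons b t' => simp at hlen
  | cons w d' ih =>
    intro t kd kt i hlen hk
    cases t with
    | nil => simp at hlen
    | cons b t' =>
      have hlen' : d'.length = t'.length := by simpa using hlen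
      by_cases h : pvAMem w p
      · -- w is punctuation: pop at position kd.length, recurse with i+1
        have hcol : pvCollect p (w :: d') (i + (kd.length : Int))
            = (i + (kd.length : Int)) :: pvCollect p d' (i + (kd.length : Int) + 1) := by
          rw [pvCollect]; simp [h]
        have hsub : i + (kd.length : Int) - i = ((kd.length : Nat) : Int) := by omega
        have hd : PySem.List.pop? (kd ++ w :: d') (i + (kd.length : Int) - i)
            = some (w, kd ++ d') := by
          rw [hsub, PySem.List.pop?_natCast _ _ (by simp)]
          rw [pvEraseIdx_append]
          congr 1
          exact congrArg (·, kd ++ d') (List.getElem_of_append rfl rfl)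
        have ht : PySem.List.pop? (kt ++ b :: t') (i + (kd.length : Int) - i)
            = some (b, kt ++ t') := by
          rw [hsub, hk, PySem.List.pop?_natCast _ _ (by simp)]
          rw [pvEraseIdx_append_int]
          congr 1
          exact congrArg (·, kt ++ t') (List.getElem_of_append rfl rfl)
        rw [hcol, pvPops, hd, ht]
        have harith : i + (kd.length : Int) + 1 = (i + 1) + (kd.length : Int) := by omega
        rw [harith]
        show pvPops (kd ++ d') (kt ++ t') (pvCollect p d' ((i + 1) + (kd.length : Int))) (i + 1)
          = (kd ++ (pvKeep p (w :: d') (b :: t')).1, kt ++ (pvKeep p (w :: d') (b :: t')).2)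
        rw [ih t' kd kt (i + 1) hlen' hk]
        simp [pvKeep, h]
      · -- w is kept: it joins the kept prefix
        have harith : i + (kd.length : Int) + 1 = i + ((kd ++ [w]).length : Int) := by
          simp; omega
        have hcol : pvCollect p (w :: d') (i + (kd.length : Int))
            = pvCollect p d' (i + ((kd ++ [w]).length : Int)) := by
          rw [pvCollect]; simp [h, harith]
        have hk' : (kd ++ [w]).length = (kt ++ [b]).length := by simp [hk]
        have hih := ih t' (kd ++ [w]) (kt ++ [b]) i hlen' hk'
        have e1 : (kd ++ [w]) ++ d' = kd ++ w :: d' := by simp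
        have e2 : (kt ++ [b]) ++ t' = kt ++ b :: t' := by simp
        rw [e1, e2] at hih
        rw [hcol, hih]
        simp [pvKeep, h]

theorem pvTagsOf_length (p : List String) :
    ∀ (x : List String), (pvTagsOf p x).length = x.length := by
  intro x
  induction x with
  | nil => rfl
  | cons w rest ih =>
    cases rest with
    | nil => rfl
    | cons y r => simpa [pvTagsOf] using ih

-- ===== VERDICT (by name: the statement is the Claim_ definition above) =====
theorem tagging_spec : Claim_equal_tagging := by
  intro x p _ hpre
  unfold Spec_tagging tagging tagging_alt
  have hget : PySem.List.pyGet? x ((x.length : Int) - 1) = some (x.getLast hpre) := by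
    have hx : 0 < x.length := List.length_pos_iff.mpr hpre
    have : ((x.length : Int) - 1) = (((x.length - 1 : Nat)) : Int) := by omega
    rw [this, PySem.List.pyGet?_natCast]
    rw [List.getElem?_eq_getElem (by omega)]
    simp [List.getLast_eq_getElem]
  rw [hget]
  obtain ⟨h1, h2⟩ := pvAPhase1_eq p x hpre
  simp only [pvDeletePunc, h1, h2]
  have := pvPops_eq p x (pvTagsOf p x) [] [] 0 (pvTagsOf_length p x).symm rfl
  simp only [List.nil_append, List.length_nil, Nat.cast_zero, add_zero] at this
  rw [this, pvBGo_eq]
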